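-- pv_equiv track=rewrite | github.com/patty-chow/cs-313e | WordSearch.py | hR
-- ===== SOURCE A (Python) =====
-- def hR(grid, word):
--   cord = tuple()
--   x = 0
--   for row in grid:
--     my_str = ""
--     x += 1
--     for letter in row:
--       my_str = letter + my_str
--
--     if my_str.find(word) != -1:
--       y = len(my_str) - my_str.find(word)
--       cord = (x, y)
--
--   return cord
-- ===== SOURCE B (Python) =====
-- def hR(grid, word):
--     # Scan rows back-to-front and return at the first hit (A keeps the last hit
--     # of a forward scan); each row is reversed once with join instead of a
--     # character-prepend loop.
--     for x, row in reversed(list(enumerate(grid, 1))):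
--         s = "".join(reversed(row))
--         p = s.find(word)
--         if p != -1:
--             return (x, len(s) - p)
--     return ()
-- ===== Notes on version B (the rewrite author's own statement) =====
-- stated objective: faster
-- what changed: B walks the grid back-to-front and returns at the first matching row (A scans forward, overwriting the last match), and builds each reversed row with a single join instead of a character-by-character string-prepend loop.
import Mathlib
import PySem

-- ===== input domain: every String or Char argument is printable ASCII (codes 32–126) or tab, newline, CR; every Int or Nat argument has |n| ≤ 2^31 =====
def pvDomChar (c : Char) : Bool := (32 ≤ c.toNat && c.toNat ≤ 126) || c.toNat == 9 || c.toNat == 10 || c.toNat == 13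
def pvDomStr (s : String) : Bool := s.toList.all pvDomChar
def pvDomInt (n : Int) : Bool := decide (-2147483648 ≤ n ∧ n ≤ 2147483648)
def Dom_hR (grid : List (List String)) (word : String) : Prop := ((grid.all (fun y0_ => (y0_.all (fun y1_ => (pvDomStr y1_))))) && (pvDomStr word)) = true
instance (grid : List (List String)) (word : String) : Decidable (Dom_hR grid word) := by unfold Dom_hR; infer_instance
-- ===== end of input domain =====

-- B scans the grid back-to-front and returns at the first matching row (A scans
-- forward keeping the last match) and reverses each row with one join instead of
-- a character-prepend loop; equal return value proved on all inputs in Dom.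


-- ===== PORT A =====
def hR (grid : List (List String)) (word : String) : List Int :=
  (grid.foldl (fun (st : List Int × Int) row =>
      let x := st.2 + 1
      let my_str := row.foldl (fun my_str letter => letter ++ my_str) ""
      let cord := if PySem.Str.find my_str word ≠ -1
        then [x, PySem.Str.len my_str - PySem.Str.find my_str word]
        else st.1
      (cord, x))
    (([] : List Int), (0 : Int))).1

-- ===== PORT B =====
-- the for-loop over reversed(list(enumerate(grid, 1))) with early return
def hRGo (word : String) : List (Int × List String) → List Int
  | [] => []
  | (x, row) :: rest =>
    let s := PySem.Str.join "" row.reverse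
    let p := PySem.Str.find s word
    if p ≠ -1 then [x, PySem.Str.len s - p] else hRGo word rest

def hR_alt (grid : List (List String)) (word : String) : List Int :=
  hRGo word (PySem.List.enumerate grid 1).reverse

-- ===== PRECONDITION & SPEC =====
def Spec_hR (grid : List (List String)) (word : String) (out : List Int) : Prop := out = hR_alt grid word
instance (grid : List (List String)) (word : String) (out : List Int) : Decidable (Spec_hR grid word out) := by unfold Spec_hR; infer_instance

-- ===== CLAIM (what is proved, stated in full; the proofs are below) =====
def Claim_equal_hR : Prop := ∀ (grid : List (List String)) (word : String), Dom_hR grid word → Spec_hR grid word (hR grid word)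

-- ===== LEMMAS AND PROOFS =====

-- ''.join with empty separator is flatten
theorem join_nil_flatten (ps : List (List Char)) : PySem.Chars.join [] ps = ps.flatten := by
  induction ps with
  | nil => rfl
  | cons a t ih =>
    cases t with
    | nil => simp [PySem.Chars.join, List.intercalate]
    | cons b t' =>
      simp only [PySem.Chars.join, List.intercalate, List.intersperse, List.flatten] at *
      simp [ih]

theorem join_empty_append (u : List String) (r : String) :
    PySem.Str.join "" (u ++ [r]) = PySem.Str.join "" u ++ r := by
  apply String.ext
  simp [PySem.Str.toList_join, join_nil_flatten]

-- A's inner character-prepend loop builds the join of the reversed row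
theorem rowStr_eq (row : List String) (acc : String) :
    row.foldl (fun my_str letter => letter ++ my_str) acc
      = PySem.Str.join "" row.reverse ++ acc := by
  induction row generalizing acc with
  | nil =>
    apply String.ext
    simp [PySem.Str.toList_join]
  | cons r rs ih =>
    simp only [List.foldl, List.reverse_cons]
    rw [ih, join_empty_append, String.append_assoc]

theorem rowStr_eq' (row : List String) :
    row.foldl (fun my_str letter => letter ++ my_str) ""
      = PySem.Str.join "" row.reverse := by
  rw [rowStr_eq]
  apply String.ext
  simp

-- first-match scan with an explicit fallback accumulator
def goAcc (word : String) (c : List Int) : List (Int × List String) → List Int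
  | [] => c
  | (x, row) :: rest =>
    if PySem.Str.find (PySem.Str.join "" row.reverse) word ≠ -1
    then [x, PySem.Str.len (PySem.Str.join "" row.reverse)
              - PySem.Str.find (PySem.Str.join "" row.reverse) word]
    else goAcc word c rest

theorem hRGo_eq_goAcc (word : String) (l : List (Int × List String)) :
    hRGo word l = goAcc word [] l := by
  induction l with
  | nil => rfl
  | cons p rest ih =>
    obtain ⟨x, row⟩ := p
    simp only [hRGo, goAcc, ih]

theorem goAcc_append (word : String) (c : List Int) (u v : List (Int × List String)) :
    goAcc word c (u ++ v) = goAcc word (goAcc word c v) u := by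
  induction u with
  | nil => rfl
  | cons p u' ih =>
    obtain ⟨x, row⟩ := p
    simp only [List.cons_append, goAcc, ih]

-- A's forward fold (last match wins) equals the first-match scan of the reversed enumeration
theorem foldl_eq_goAcc (word : String) (grid : List (List String)) (c : List Int) (i : Int) :
    (grid.foldl (fun (st : List Int × Int) row =>
        let x := st.2 + 1
        let my_str := row.foldl (fun my_str letter => letter ++ my_str) ""
        let cord := if PySem.Str.find my_str word ≠ -1
          then [x, PySem.Str.len my_str - PySem.Str.find my_str word]
          else st.1
        (cord, x)) (c, i)).1
      = goAcc word c (PySem.List.enumerate grid (i + 1)).reverse := by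
  induction grid generalizing c i with
  | nil => rfl
  | cons row rest ih =>
    have henum : PySem.List.enumerate (row :: rest) (i + 1)
        = (i + 1, row) :: PySem.List.enumerate rest (i + 1 + 1) := rfl
    rw [henum, List.reverse_cons]
    rw [goAcc_append]
    simp only [List.foldl, ih]
    congr 1
    simp only [goAcc, rowStr_eq']

-- ===== VERDICT (by name: the statement is the Claim_ definition above) =====
theorem hR_spec : Claim_equal_hR := by
  intro grid word _
  show hR grid word = hR_alt grid word
  unfold hR hR_alt
  rw [foldl_eq_goAcc, hRGo_eq_goAcc]
  norm_num
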